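-- pv_equiv track=rewrite | github.com/yyin0103/amira-data-challenge-v2 | lexical.py | orthographic_complexity
-- ===== SOURCE A (Python) =====
-- def orthographic_complexity(word):
--
--     """
--     To calculate orthographic_complexity that could affect pronunciation
--     for a word. Used for linguistic analysis.
--
--     (TODO) More rules could be added. Calculation method to be adjusted.
--
--     Args:
--       word: the word to process
--
--     Return:
--       float: complexcity score
--
--     """
--
--     # silent letters (example)
--     silent_letters = ['kn', 'w', 'b', 'pn', 'ps']
--
--     # multigraphs (example)
--     multigraphs = ['sh', 'ch', 'th', 'ph', 'gh']
--
--     complexity_score = 0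
--
--     for letter in silent_letters:
--         if word.startswith(letter):
--             complexity_score += 1
--
--     for mg in multigraphs:
--         complexity_score += word.count(mg)
--
--     return complexity_score
-- ===== SOURCE B (Python) =====
-- def orthographic_complexity(word):
--     silent_letters = ('kn', 'w', 'b', 'pn', 'ps')
--     multigraphs = {'sh', 'ch', 'th', 'ph', 'gh'}
--
--     score = sum(1 for p in silent_letters if word.startswith(p))
--
--     # one pass over adjacent character pairs instead of five word.count scans
--     for a, b in zip(word, word[1:]):
--         if a + b in multigraphs:
--             score += 1
--
--     return score
-- ===== Notes on version B (the rewrite author's own statement) =====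
-- stated objective: alternative
-- what changed: The five separate word.count(mg) scans are replaced by a single pass over adjacent character pairs with set membership, and the prefix bonuses become one generator sum over the silent-letter tuple.
import Mathlib
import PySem

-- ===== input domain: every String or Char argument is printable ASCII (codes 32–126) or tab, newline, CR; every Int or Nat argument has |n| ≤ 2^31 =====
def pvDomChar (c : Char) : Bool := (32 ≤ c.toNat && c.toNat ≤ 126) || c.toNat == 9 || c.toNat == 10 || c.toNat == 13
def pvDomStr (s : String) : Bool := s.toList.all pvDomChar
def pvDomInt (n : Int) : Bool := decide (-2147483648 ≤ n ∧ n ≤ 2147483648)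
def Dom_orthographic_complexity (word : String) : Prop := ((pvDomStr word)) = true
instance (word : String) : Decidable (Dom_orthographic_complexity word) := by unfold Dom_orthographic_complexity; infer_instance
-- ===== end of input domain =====

-- B replaces the five separate word.count(mg) scans by one pass over adjacent character pairs (alternative decomposition, same cost class).

-- ===== PORT A =====
-- literal transliteration: two for-loops over the literal lists, startswith tests, then count sums
def orthographic_complexity (word : String) : Int :=
  let silent_letters : List String := ["kn", "w", "b", "pn", "ps"]
  let multigraphs : List String := ["sh", "ch", "th", "ph", "gh"]
  let complexity_score : Int :=
    silent_letters.foldl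
      (fun acc letter => if PySem.Str.startswith word letter then acc + 1 else acc) 0
  multigraphs.foldl
    (fun acc mg => acc + (PySem.Str.count word mg : Int)) complexity_score

-- ===== PORT B =====
-- literal transliteration of Source B: a countP (the generator sum) over the prefix tuple,
-- then one fold over zip(word, word[1:]) testing membership of the pair in the multigraph set
def orthographic_complexity_alt (word : String) : Int :=
  let cs : List Char := word.toList
  let silent_letters : List (List Char) := [['k','n'], ['w'], ['b'], ['p','n'], ['p','s']]
  let multigraphs : List (List Char) := [['s','h'], ['c','h'], ['t','h'], ['p','h'], ['g','h']]
  let score : Int := (silent_letters.countP (fun p => PySem.Chars.startswith cs p) : Int)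
  (cs.zip cs.tail).foldl
    (fun sc ab => if multigraphs.contains [ab.1, ab.2] then sc + 1 else sc) score

-- ===== PRECONDITION & SPEC =====
def Spec_orthographic_complexity (word : String) (out : Int) : Prop := out = orthographic_complexity_alt word
instance (word : String) (out : Int) : Decidable (Spec_orthographic_complexity word out) := by unfold Spec_orthographic_complexity; infer_instance

-- ===== CLAIM (what is proved, stated in full; the proofs are below) =====
def Claim_equal_orthographic_complexity : Prop := ∀ (word : String), Dom_orthographic_complexity word → Spec_orthographic_complexity word (orthographic_complexity word)

-- ===== LEMMAS AND PROOFS =====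

-- Python's str.count for a two-character pattern a·b with a ≠ b equals the number of
-- adjacent pairs (a, b): the non-overlapping skip of count.go never loses a match.
theorem count_go_two (a b : Char) (hne : a ≠ b) :
    ∀ (fuel : Nat) (s : List Char) (acc : Nat), s.length ≤ fuel →
      PySem.Chars.count.go [a, b] fuel s acc =
        acc + (s.zip s.tail).countP (fun p => p.1 == a && p.2 == b) := by
  intro fuel
  induction fuel with
  | zero =>
    intro s acc hlen
    obtain rfl : s = [] := List.eq_nil_of_length_eq_zero (Nat.le_zero.mp hlen)
    simp [PySem.Chars.count.go]
  | succ fuel ih =>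
    intro s acc hlen
    match s with
    | [] => simp [PySem.Chars.count.go]
    | [h] =>
      rw [PySem.Chars.count.go]
      have hp : ([a,b].isPrefixOf [h]) = false := by simp [List.isPrefixOf]
      rw [hp]
      simp [ih [] acc (Nat.zero_le _)]
    | h :: b' :: t' =>
      rw [PySem.Chars.count.go]
      by_cases hpre : [a,b].isPrefixOf (h :: b' :: t') = true
      · have hab : h = a ∧ b' = b := by
          simp only [List.isPrefixOf, Bool.and_true, Bool.and_eq_true, beq_iff_eq] at hpre
          exact ⟨hpre.1.symm, hpre.2.symm⟩
        obtain ⟨rfl, rfl⟩ := hab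
        rw [if_pos hpre]
        have hd : List.drop ([h,b'] : List Char).length (h::b'::t') = t' := rfl
        rw [hd, ih t' (acc+1) (by simp at hlen ⊢; omega)]
        cases t' with
        | nil => simp
        | cons c t'' =>
          simp [List.zip, Ne.symm hne]
          omega
      · rw [if_neg hpre]
        rw [ih (b'::t') acc (by simp at hlen ⊢; omega)]
        have hfalse : (h == a && b' == b) = false := by
          simp only [List.isPrefixOf, Bool.and_true, Bool.and_eq_true, beq_iff_eq] at hpre
          cases hh : (h == a) <;> cases hb : (b' == b) <;> simp_all
        simp [List.zip, hfalse]

theorem count_two (a b : Char) (hne : a ≠ b) (s : List Char) :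
    PySem.Chars.count s [a, b] =
      (s.zip s.tail).countP (fun p => p.1 == a && p.2 == b) := by
  simp [PySem.Chars.count, count_go_two a b hne s.length s 0 le_rfl]

-- B's single membership test over the multigraph set splits into the five per-digraph counts
theorem countP_pairs_split (l : List (Char × Char)) :
    l.countP (fun ab => ([['s','h'],['c','h'],['t','h'],['p','h'],['g','h']] : List (List Char)).contains [ab.1, ab.2]) =
      l.countP (fun p => p.1 == 's' && p.2 == 'h') + l.countP (fun p => p.1 == 'c' && p.2 == 'h') +
      l.countP (fun p => p.1 == 't' && p.2 == 'h') + l.countP (fun p => p.1 == 'p' && p.2 == 'h') +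
      l.countP (fun p => p.1 == 'g' && p.2 == 'h') := by
  induction l with
  | nil => simp
  | cons x t ih =>
    rcases x with ⟨u, v⟩
    rw [List.countP_cons, List.countP_cons, List.countP_cons, List.countP_cons,
      List.countP_cons, List.countP_cons, ih]
    simp only [List.contains_cons, List.contains_nil, Bool.or_false, List.cons_beq_cons]
    by_cases h1 : u = 's' <;> by_cases h2 : u = 'c' <;> by_cases h3 : u = 't' <;>
      by_cases h4 : u = 'p' <;> by_cases h5 : u = 'g' <;>
      cases hv : (v == 'h') <;> simp_all <;> omega

-- ===== VERDICT (by name: the statement is the Claim_ definition above) =====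
theorem orthographic_complexity_spec : Claim_equal_orthographic_complexity := by
  intro word _
  unfold Spec_orthographic_complexity orthographic_complexity orthographic_complexity_alt
  simp only [PySem.List.foldl_if_add_one, PySem.List.foldl_add]
  rw [countP_pairs_split]
  simp [List.countP_cons, count_two 's' 'h' (by decide), count_two 'c' 'h' (by decide),
    count_two 't' 'h' (by decide), count_two 'p' 'h' (by decide), count_two 'g' 'h' (by decide)]
  ring
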